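-- pv_equiv track=rewrite | github.com/flufy3d/xinhe | xinhe/data/validator/beat3_repetition.py | _count_ngrams
-- ===== SOURCE A (Python) =====
-- def _count_ngrams(text: str, n: int) -> dict[str, int]:
--     counts: dict[str, int] = {}
--     if len(text) < n:
--         return counts
--     for i in range(len(text) - n + 1):
--         gram = text[i:i + n]
--         # 跳过仅空白 / 标点的窗口(降误判)
--         if all(not c.isalnum() and not ('一' <= c <= '鿿') for c in gram):
--             continue
--         counts[gram] = counts.get(gram, 0) + 1
--     return counts
-- ===== SOURCE B (Python) =====
-- def _valid(c: str) -> bool: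
--     return c.isalnum() or ('\u4e00' <= c <= '\u9fff')
--
--
-- def _count_ngrams(text: str, n: int) -> dict[str, int]:
--     counts: dict[str, int] = {}
--     if n <= 0 or len(text) < n:
--         return counts
--     # prefix sums: pref[j] = number of valid chars in text[:j]
--     pref = [0]
--     total = 0
--     for c in text:
--         if _valid(c):
--             total += 1
--         pref.append(total)
--     for i in range(len(text) - n + 1):
--         if pref[i + n] - pref[i] > 0:
--             gram = text[i:i + n]
--             counts[gram] = counts.get(gram, 0) + 1
--     return counts
-- ===== Notes on version B (the rewrite author's own statement) =====
-- stated objective: alternative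
-- what changed: B precomputes a prefix-sum table of valid-character counts over the text and decides each window by one subtraction (pref[i+n]-pref[i] > 0) instead of A's per-window scan of all n characters, and returns {} outright for n <= 0.
-- intended difference: For n < 0, Python's negative slice stop wraps around, so A counts accidental substrings text[i:len(text)+i+n] (nonempty result exactly when len(text) > -n and a valid character sits before the last position), while B returns {} — the intended value, since there are no n-grams of negative length. — e.g. on _count_ngrams("ab", -1): A returns [("a", 1)], B returns []
import Mathlib
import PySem

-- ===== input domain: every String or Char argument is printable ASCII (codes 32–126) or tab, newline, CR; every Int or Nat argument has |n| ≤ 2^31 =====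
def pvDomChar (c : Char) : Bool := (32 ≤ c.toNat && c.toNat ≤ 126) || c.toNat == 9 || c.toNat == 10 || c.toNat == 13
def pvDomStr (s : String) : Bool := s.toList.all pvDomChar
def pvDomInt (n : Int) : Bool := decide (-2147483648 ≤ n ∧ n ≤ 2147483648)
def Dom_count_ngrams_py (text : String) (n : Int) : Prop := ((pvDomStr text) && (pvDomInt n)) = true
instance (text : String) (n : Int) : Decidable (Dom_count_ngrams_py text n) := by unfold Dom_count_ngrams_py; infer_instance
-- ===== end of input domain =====

-- B replaces the per-window all-punctuation scan by a prefix-sum table of valid-character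
-- counts (one subtraction per window) and returns {} directly for n ≤ 0, where A's
-- negative-slice wraparound counts accidental substrings; objective: alternative.

-- ===== PORT A =====
-- loop body of A ('for i in range(len(text) - n + 1): ...')
def pvStepA (text : String) (n : Int) (counts : PySem.Dict String Int) (i : Int) :
    PySem.Dict String Int :=
  let gram := PySem.Str.slice text (some i) (some (i + n))
  if gram.toList.all (fun c => !PySem.Chars.isalnum c && !(('一' ≤ c) && (c ≤ '鿿'))) then
    counts
  else
    counts.insert gram (counts.getD gram 0 + 1)

def count_ngrams_py (text : String) (n : Int) : List (String × Int) :=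
  let counts : PySem.Dict String Int := PySem.Dict.empty
  if PySem.Str.len text < n then counts.items
  else ((PySem.List.pyRange 0 (PySem.Str.len text - n + 1)).foldl (pvStepA text n) counts).items

-- ===== PORT B =====
-- the validity predicate `_valid` of Source B
def pvValid (c : Char) : Bool := PySem.Chars.isalnum c || (('一' ≤ c) && (c ≤ '鿿'))

-- body of Source B's prefix-sum loop ('if _valid(c): total += 1; pref.append(total)')
def pvPrefStep (s : List Int × Int) (c : Char) : List Int × Int :=
  let total := if pvValid c then s.2 + 1 else s.2
  (s.1 ++ [total], total)

-- body of Source B's window loop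
def pvStepB (pref : List Int) (text : String) (n : Int) (counts : PySem.Dict String Int)
    (i : Int) : PySem.Dict String Int :=
  if PySem.List.pyGetD pref (i + n) 0 - PySem.List.pyGetD pref i 0 > 0 then
    let gram := PySem.Str.slice text (some i) (some (i + n))
    counts.insert gram (counts.getD gram 0 + 1)
  else counts

def count_ngrams_py_alt (text : String) (n : Int) : List (String × Int) :=
  let counts : PySem.Dict String Int := PySem.Dict.empty
  if n ≤ 0 ∨ PySem.Str.len text < n then counts.items
  else
    let pref := (text.toList.foldl pvPrefStep ([0], 0)).1
    ((PySem.List.pyRange 0 (PySem.Str.len text - n + 1)).foldl (pvStepB pref text n) counts).items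

-- ===== PRECONDITION & SPEC =====
-- For n < 0 Python's negative slice stop wraps around, so A counts accidental substrings
-- text[i:len(text)+i+n] (a nonempty count exactly when some valid character sits before the
-- last position), while B returns {} — the intended value: there are no n-grams of negative length.
-- input-level "valid character" predicate (a letter, a digit, or a CJK code point),
-- stated independently of the ports
def pvValidChar (c : Char) : Bool :=
  decide (PySem.Chars.isalpha c = true ∨ PySem.Chars.isdigit c = true ∨
    (0x4e00 ≤ c.toNat ∧ c.toNat ≤ 0x9fff))

def D_count_ngrams_py (text : String) (n : Int) : Prop :=
  n < 0 ∧ 0 < (text.toList.length : Int) + n ∧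
    (text.toList.take (text.toList.length - 1)).any pvValidChar = true
instance (text : String) (n : Int) : Decidable (D_count_ngrams_py text n) := by
  unfold D_count_ngrams_py; infer_instance

def Spec_count_ngrams_py (text : String) (n : Int) (out : List (String × Int)) : Prop :=
  ¬ D_count_ngrams_py text n → out = count_ngrams_py_alt text n
instance (text : String) (n : Int) (out : List (String × Int)) : Decidable (Spec_count_ngrams_py text n out) := by
  unfold Spec_count_ngrams_py; infer_instance

def pvDiffWitness_count_ngrams_py : String × Int := ("ab", -1)
def pvDiffWitnessOut_count_ngrams_py : (List (String × Int)) × (List (String × Int)) :=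
  ([("a", 1)], [])

-- ===== CLAIM (what is proved, stated in full; the proofs are below) =====
def Claim_unchanged_count_ngrams_py : Prop := ∀ (text : String) (n : Int), Dom_count_ngrams_py text n → Spec_count_ngrams_py text n (count_ngrams_py text n)
def Claim_changed_count_ngrams_py : Prop := Dom_count_ngrams_py (pvDiffWitness_count_ngrams_py.1) (pvDiffWitness_count_ngrams_py.2) ∧ D_count_ngrams_py (pvDiffWitness_count_ngrams_py.1) (pvDiffWitness_count_ngrams_py.2) ∧ count_ngrams_py (pvDiffWitness_count_ngrams_py.1) (pvDiffWitness_count_ngrams_py.2) = pvDiffWitnessOut_count_ngrams_py.1 ∧ count_ngrams_py_alt (pvDiffWitness_count_ngrams_py.1) (pvDiffWitness_count_ngrams_py.2) = pvDiffWitnessOut_count_ngrams_py.2 ∧ pvDiffWitnessOut_count_ngrams_py.1 ≠ pvDiffWitnessOut_count_ngrams_py.2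
def Claim_exact_count_ngrams_py : Prop := ∀ (text : String) (n : Int), Dom_count_ngrams_py text n → D_count_ngrams_py text n → count_ngrams_py text n ≠ count_ngrams_py_alt text n

-- ===== LEMMAS AND PROOFS =====

-- the input-level predicate of D_ agrees with Source B's _valid
theorem pvValid_eq : pvValid = pvValidChar := by
  funext c
  simp only [pvValid, pvValidChar, PySem.Chars.isalnum]
  have h1 : ('一' ≤ c) ↔ (0x4e00 ≤ c.toNat) := by
    rw [Char.le_def, UInt32.le_iff_toNat_le]
    rfl
  have h2 : (c ≤ '鿿') ↔ (c.toNat ≤ 0x9fff) := by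
    rw [Char.le_def, UInt32.le_iff_toNat_le]
    rfl
  rw [decide_eq_decide.mpr h1, decide_eq_decide.mpr h2]
  · cases PySem.Chars.isalpha c <;> cases PySem.Chars.isdigit c <;>
      by_cases hx : 0x4e00 ≤ c.toNat <;> by_cases hy : c.toNat ≤ 0x9fff <;>
        simp [hx, hy]
  · exact inferInstance
  · exact inferInstance

-- B's prefix-sum loop, characterised
theorem pvPref_foldl (l : List Char) (p : List Int) (t : Int) :
    l.foldl pvPrefStep (p, t)
    = (p ++ (List.range l.length).map (fun k => t + ((l.take (k+1)).countP pvValid : Int)),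
       t + (l.countP pvValid : Int)) := by
  induction l generalizing p t with
  | nil => simp
  | cons c l ih =>
    simp only [List.foldl_cons]
    rw [show pvPrefStep (p, t) c
          = (p ++ [if pvValid c then t + 1 else t], if pvValid c then t + 1 else t) from rfl]
    rw [ih]
    refine Prod.ext ?_ ?_
    · simp only [List.length_cons, List.range_succ_eq_map, List.map_cons, List.map_map]
      simp only [List.take_succ_cons, List.countP_cons, List.take_zero, List.countP_nil]
      by_cases h : pvValid c <;>
        simp [h, Function.comp, List.append_assoc, add_comm, add_assoc]
    · simp only [List.countP_cons]
      by_cases h : pvValid c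
      · simp [h]
        ring
      · simp [h]
theorem pvPref_closed (l : List Char) :
    (l.foldl pvPrefStep ([0], 0)).1
    = (List.range (l.length + 1)).map (fun j => (((l.take j).countP pvValid : Int))) := by
  rw [pvPref_foldl]
  simp [List.range_succ_eq_map, List.map_map, Function.comp]

-- window slices for a nonnegative window
theorem pvSlice_window (l : List Char) (i n : Int) (h0 : 0 ≤ i) (hn : 0 ≤ n) :
    PySem.List.slice l (some i) (some (i + n)) = (l.drop i.toNat).take n.toNat := by
  rw [PySem.List.slice_toNat l h0 (by omega)]
  congr 1
  omega

-- A's all-punctuation test is the negation of "some valid char"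
theorem pvTest_eq (g : List Char) :
    g.all (fun c => !PySem.Chars.isalnum c && !(('一' ≤ c) && (c ≤ '鿿'))) = !g.any pvValid := by
  induction g with
  | nil => simp
  | cons c g ih =>
    simp only [List.all_cons, List.any_cons, ih, Bool.not_or, pvValid]

theorem pvCountP_window (l : List Char) (i n : Int) (h0 : 0 ≤ i) (hn : 0 < n) :
    ((l.take (i + n).toNat).countP pvValid : Int) - ((l.take i.toNat).countP pvValid : Int)
      = (((l.drop i.toNat).take n.toNat).countP pvValid : Int) := by
  have h : (i + n).toNat = i.toNat + n.toNat := by omega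
  rw [h, List.take_add, List.countP_append]
  push_cast; ring

theorem pvInsert_items_ne_nil {κ ν : Type} [BEq κ] (d : PySem.Dict κ ν) (k : κ) (v : ν) :
    (d.insert k v).items ≠ [] := by
  simp only [PySem.Dict.insert]
  split_ifs with h
  · intro hmap
    simp only [List.map_eq_nil_iff] at hmap
    simp [PySem.Dict.contains, hmap] at h
  · simp

-- agreement of the two loop bodies on the real domain 1 ≤ n ≤ len(text)
theorem pvMain (text : String) (n : Int) (hn : 0 < n) (hle : n ≤ (text.toList.length : Int)) :
    count_ngrams_py text n = count_ngrams_py_alt text n := by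
  have hL : PySem.Str.len text = (text.toList.length : Int) := by
    simp [PySem.Str.len_eq]
  unfold count_ngrams_py count_ngrams_py_alt
  rw [if_neg (by omega : ¬ PySem.Str.len text < n),
      if_neg (by intro hx; rcases hx with hx | hx <;> omega : ¬ (n ≤ 0 ∨ PySem.Str.len text < n))]
  refine congrArg PySem.Dict.items ?_
  apply PySem.List.foldl_congr_mem
  intro acc i hi
  rw [hL, PySem.List.mem_pyRange_one] at hi
  obtain ⟨h0, hub⟩ := hi
  set L := text.toList with hLdef
  have hpref := pvPref_closed L
  have hget : ∀ j : Int, 0 ≤ j → j ≤ (L.length : Int) →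
      PySem.List.pyGetD (L.foldl pvPrefStep ([0], 0)).1 j 0
        = ((L.take j.toNat).countP pvValid : Int) := by
    intro j hj0 hj1
    rw [hpref, PySem.List.pyGetD_eq_getElem _ _ hj0 (by simp; omega)]
    simp
  have hglist : (PySem.Str.slice text (some i) (some (i + n))).toList
      = (L.drop i.toNat).take n.toNat := by
    rw [PySem.Str.toList_slice, PySem.Chars.slice_eq_listSlice]
    exact pvSlice_window L i n h0 (by omega)
  simp only [pvStepA, pvStepB]
  rw [hget (i + n) (by omega) (by omega), hget i h0 (by omega),
      pvCountP_window L i n h0 hn, hglist, pvTest_eq]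
  set g := (L.drop i.toNat).take n.toNat with hg
  by_cases hany : g.any pvValid = true
  · have hpos : 0 < g.countP pvValid := by
      obtain ⟨c, hc, hv⟩ := List.any_eq_true.mp hany
      exact List.countP_pos_iff.mpr ⟨c, hc, hv⟩
    rw [hany, Bool.not_true, if_neg (by simp), if_pos (by exact_mod_cast hpos)]
  · have hz : g.countP pvValid = 0 := by
      rw [List.countP_eq_zero]
      intro c hc
      simp only [Bool.not_eq_true]
      by_contra hv
      exact hany (List.any_eq_true.mpr ⟨c, hc, by simpa using hv⟩)
    rw [Bool.not_eq_true] at hany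
    rw [hany, Bool.not_false, if_pos rfl, if_neg (by simp [hz])]

theorem pvZero (text : String) : count_ngrams_py text 0 = [] := by
  unfold count_ngrams_py
  rw [if_neg (by simp [PySem.Str.len_eq])]
  rw [PySem.List.foldl_congr_mem _ _ (fun acc _ => acc) _ ?_, PySem.List.foldl_ignore]
  · rfl
  · intro acc i hi
    rw [PySem.List.mem_pyRange_one] at hi
    have hg : (PySem.Str.slice text (some i) (some (i + 0))).toList = [] := by
      rw [PySem.Str.toList_slice, PySem.Chars.slice_eq_listSlice,
          pvSlice_window _ i 0 hi.1 le_rfl]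
      simp
    simp only [pvStepA]
    rw [if_pos (by rw [hg]; rfl)]

-- every window of A is clamped to drop a (take b l); for n < 0 outside D_ all windows are skipped
theorem pvSlice_eq_drop_take (l : List Char) (i m : Int) :
    PySem.List.slice l (some i) (some m)
      = (l.take (PySem.List.clampIdx l.length m)).drop (PySem.List.clampIdx l.length i) := by
  simp only [PySem.List.slice, List.drop_take]

theorem pvNegSmall (text : String) (n : Int) (hn : n < 0)
    (h : ¬ D_count_ngrams_py text n) :
    count_ngrams_py text n = [] := by
  set L := text.toList with hLdef
  unfold count_ngrams_py
  rw [if_neg (by simp [PySem.Str.len_eq]; omega)]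
  rw [PySem.List.foldl_congr_mem _ _ (fun acc _ => acc) _ ?_, PySem.List.foldl_ignore]
  · rfl
  · intro acc i hi
    rw [PySem.List.mem_pyRange_one] at hi
    obtain ⟨h0, _⟩ := hi
    have hcond : (PySem.Str.slice text (some i) (some (i + n))).toList.all
        (fun c => !PySem.Chars.isalnum c && !(('一' ≤ c) && (c ≤ '鿿'))) = true := by
      rw [pvTest_eq, Bool.not_eq_true', List.any_eq_false]
      intro c hc
      rw [PySem.Str.toList_slice, PySem.Chars.slice_eq_listSlice, pvSlice_eq_drop_take] at hc
      have hc' := List.mem_of_mem_drop hc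
      by_cases hmag : 0 < (L.length : Int) + n
      · -- every window sits inside take (len - 1); no valid char there
        have hany : (L.take (L.length - 1)).any pvValid = false := by
          rcases hb : (L.take (L.length - 1)).any pvValid
          · rfl
          · exact absurd ⟨hn, hmag, by rw [← pvValid_eq]; exact hb⟩ h
        rw [List.any_eq_false] at hany
        by_cases hin : i + n < 0
        · apply hany
          have hble : PySem.List.clampIdx L.length (i + n) ≤ L.length - 1 := by
            simp only [PySem.List.clampIdx]
            split_ifs <;> omega
          have heq : L.take (PySem.List.clampIdx L.length (i + n))
              = (L.take (L.length - 1)).take (PySem.List.clampIdx L.length (i + n)) := by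
            rw [List.take_take, min_eq_left hble]
          rw [heq] at hc'
          exact List.take_subset _ _ hc'
        · -- i + n ≥ 0 and n < 0: the window is empty
          exfalso
          have hcl : PySem.List.clampIdx L.length (i + n) ≤ PySem.List.clampIdx L.length i := by
            simp only [PySem.List.clampIdx]
            split_ifs <;> omega
          have hzz : ((L.take (PySem.List.clampIdx L.length (i + n))).drop
              (PySem.List.clampIdx L.length i)).length = 0 := by
            rw [List.length_drop]
            simp only [List.length_take]
            omega
          rw [List.length_eq_zero_iff] at hzz
          rw [hzz] at hc
          exact List.not_mem_nil hc
      · -- len + n ≤ 0: every window is empty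
        exfalso
        have hcl : PySem.List.clampIdx L.length (i + n) ≤ PySem.List.clampIdx L.length i := by
          simp only [PySem.List.clampIdx]
          split_ifs <;> omega
        have hzz : ((L.take (PySem.List.clampIdx L.length (i + n))).drop
            (PySem.List.clampIdx L.length i)).length = 0 := by
          rw [List.length_drop]
          simp only [List.length_take]
          omega
        rw [List.length_eq_zero_iff] at hzz
        rw [hzz] at hc
        exact List.not_mem_nil hc
    simp only [pvStepA]
    rw [if_pos hcond]

-- folds of A's step preserve and create nonemptiness (for the tightness theorem)
theorem pvFoldA_ne_nil_of_ne_nil (text : String) (n : Int) (l : List Int)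
    (d : PySem.Dict String Int) (h : d.items ≠ []) :
    (l.foldl (pvStepA text n) d).items ≠ [] := by
  induction l generalizing d with
  | nil => exact h
  | cons x l ih =>
    simp only [List.foldl_cons]
    apply ih
    simp only [pvStepA]
    split_ifs
    · exact h
    · exact pvInsert_items_ne_nil _ _ _

theorem pvFoldA_ne_nil_of_hit (text : String) (n : Int) (l : List Int)
    (d : PySem.Dict String Int) (i0 : Int) (hmem : i0 ∈ l)
    (hfalse : (PySem.Str.slice text (some i0) (some (i0 + n))).toList.all
      (fun c => !PySem.Chars.isalnum c && !(('一' ≤ c) && (c ≤ '鿿'))) = false) :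
    (l.foldl (pvStepA text n) d).items ≠ [] := by
  induction l generalizing d with
  | nil => exact absurd hmem (List.not_mem_nil)
  | cons x l ih =>
    simp only [List.foldl_cons]
    rcases List.mem_cons.mp hmem with hx | hx
    · subst hx
      apply pvFoldA_ne_nil_of_ne_nil
      simp only [pvStepA]
      rw [if_neg (by rw [hfalse]; exact Bool.false_ne_true)]
      exact pvInsert_items_ne_nil _ _ _
    · exact ih _ hx

-- ===== VERDICT (by name: the statement is the Claim_ definition above) =====
theorem count_ngrams_py_spec : Claim_unchanged_count_ngrams_py := by
  intro text n _ hnd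
  rcases lt_trichotomy n 0 with hneg | hzero | hpos
  · rw [pvNegSmall text n hneg hnd]
    unfold count_ngrams_py_alt
    rw [if_pos (Or.inl (by omega))]
    rfl
  · subst hzero
    rw [pvZero]
    unfold count_ngrams_py_alt
    rw [if_pos (Or.inl le_rfl)]
    rfl
  · have htl : text.toList.length = text.length := by simp
    by_cases hle : n ≤ (text.toList.length : Int)
    · exact pvMain text n hpos hle
    · unfold count_ngrams_py count_ngrams_py_alt
      rw [if_pos (by simp [PySem.Str.len_eq]; omega),
          if_pos (Or.inr (by simp [PySem.Str.len_eq]; omega))]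

theorem count_ngrams_py_changed : Claim_changed_count_ngrams_py := by
  unfold Claim_changed_count_ngrams_py; decide

theorem count_ngrams_py_tight : Claim_exact_count_ngrams_py := by
  intro text n _ hd
  obtain ⟨hn, hmag, hany⟩ := hd
  rw [← pvValid_eq] at hany
  have hBnil : count_ngrams_py_alt text n = [] := by
    unfold count_ngrams_py_alt
    rw [if_pos (Or.inl (by omega))]
    rfl
  rw [hBnil]
  have htl : text.toList.length = text.length := by simp
  unfold count_ngrams_py
  rw [if_neg (by simp [PySem.Str.len_eq]; omega)]
  -- find a valid character strictly before the last position
  obtain ⟨c, hcmem, hcval⟩ := List.any_eq_true.mp hany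
  obtain ⟨p, hp, hpc⟩ := List.mem_iff_getElem.mp hcmem
  have hplen : p < text.toList.length - 1 := by
    have := hp
    simp only [List.length_take] at this
    omega
  have hlen2 : 2 ≤ text.toList.length := by omega
  -- the hitting window index
  obtain ⟨i0, hi0a, hi0b, hi0c, hi0d⟩ :
      ∃ i0 : Int, 0 ≤ i0 ∧ (p : Int) + 1 - (text.toList.length : Int) - n ≤ i0 ∧
        i0 ≤ (p : Int) ∧ i0 ≤ -n - 1 := by
    refine ⟨max 0 ((p : Int) + 1 - (text.toList.length : Int) - n), le_max_left _ _, le_max_right _ _,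
      max_le (by omega) (by omega), max_le (by omega) (by omega)⟩
  have hi0mem : i0 ∈ PySem.List.pyRange 0 (PySem.Str.len text - n + 1) := by
    rw [PySem.List.mem_pyRange_one]
    refine ⟨hi0a, ?_⟩
    simp only [PySem.Str.len_eq]
    omega
  apply pvFoldA_ne_nil_of_hit text n _ _ i0 hi0mem
  rw [pvTest_eq, Bool.not_eq_eq_eq_not, Bool.not_false]
  apply List.any_eq_true.mpr
  refine ⟨c, ?_, hcval⟩
  rw [PySem.Str.toList_slice, PySem.Chars.slice_eq_listSlice, pvSlice_eq_drop_take]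
  have ha : PySem.List.clampIdx text.toList.length i0 = i0.toNat := by
    simp only [PySem.List.clampIdx]
    split_ifs <;> omega
  have hb : PySem.List.clampIdx text.toList.length (i0 + n) = ((text.toList.length : Int) + i0 + n).toNat := by
    simp only [PySem.List.clampIdx]
    split_ifs <;> omega
  rw [ha, hb]
  have hi0nat : (i0.toNat : Int) = i0 := Int.toNat_of_nonneg hi0a
  have hple : i0.toNat ≤ p := by omega
  have hb2 : p < ((text.toList.length : Int) + i0 + n).toNat := by omega
  have hble : ((text.toList.length : Int) + i0 + n).toNat ≤ text.toList.length := by omega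
  apply List.mem_iff_getElem.mpr
  refine ⟨p - i0.toNat, ?_, ?_⟩
  · simp only [List.length_drop, List.length_take]
    omega
  · rw [List.getElem_drop, List.getElem_take]
    have hidx : i0.toNat + (p - i0.toNat) = p := by omega
    simp only [hidx]
    rw [← hpc, List.getElem_take]
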